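-- pv_equiv track=rewrite | github.com/asdftoger/tdd-projecteuler | project_euler.py | sum_natural_multiples
-- ===== SOURCE A (Python) =====
-- def sum_natural_multiples(n: int, mults: list[int]):
--     acc = 0
--     for i in range(n+1):
--         for mult in mults:
--             if i % mult == 0:
--                 acc += i
--                 break
--     return acc
-- ===== SOURCE B (Python) =====
-- def sum_natural_multiples(n, mults):
--     # Sieve: mark the multiples of every distinct |m| once, then sum the marked
--     # indices -- instead of testing every i in 0..n against every modulus.
--     if n < 0:
--         return 0
--     marked = [False] * (n + 1)
--     for m in set(abs(x) for x in mults):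
--         for j in range(0, n + 1, m):
--             marked[j] = True
--     return sum(i for i in range(n + 1) if marked[i])
-- ===== Notes on version B (the rewrite author's own statement) =====
-- stated objective: faster
-- what changed: Replaces A's O(n*k) scan testing every integer 0..n against every modulus with a sieve: mark the multiples of each distinct |m| once in a boolean table, then sum the marked indices.
-- outside the precondition, e.g. on sum_natural_multiples(0, [2, 0]): A returns 0, B raises ValueError; on sum_natural_multiples(5, [1, 0]): A returns 15, B raises ValueError
import Mathlib
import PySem

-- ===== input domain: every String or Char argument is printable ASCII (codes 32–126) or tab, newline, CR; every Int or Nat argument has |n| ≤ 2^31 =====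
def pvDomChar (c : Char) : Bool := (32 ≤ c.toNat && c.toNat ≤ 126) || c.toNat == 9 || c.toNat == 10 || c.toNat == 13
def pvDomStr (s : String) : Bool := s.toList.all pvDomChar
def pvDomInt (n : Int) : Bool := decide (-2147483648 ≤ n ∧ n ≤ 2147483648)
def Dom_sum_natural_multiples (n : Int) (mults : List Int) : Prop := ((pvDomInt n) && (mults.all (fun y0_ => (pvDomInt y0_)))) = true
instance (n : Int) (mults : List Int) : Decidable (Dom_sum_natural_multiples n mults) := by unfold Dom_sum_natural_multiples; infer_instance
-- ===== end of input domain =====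

-- B replaces A's per-integer divisor scan of 0..n with a sieve that marks the
-- multiples of each distinct |m| once, then sums the marked indices (objective: faster).


-- ===== PORT A =====
-- for i in range(n+1): for mult in mults: if i % mult == 0: acc += i; break
-- (the inner loop with break adds i exactly when a first divisor among mults is found;
--  List.any scans mults in order and stops at the first hit, like the break)
def sum_natural_multiples (n : Int) (mults : List Int) : Int :=
  (PySem.List.pyRange 0 (n + 1) 1).foldl
    (fun acc i => if mults.any (fun m => PySem.Int.mod i m == 0) then acc + i else acc) 0

-- ===== PORT B =====
-- marked = [False]*(n+1); for m in set(abs(x) for x in mults):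
--   for j in range(0, n+1, m): marked[j] = True
-- return sum(i for i in range(n+1) if marked[i])
-- (marked[i] is ported as Array.getD i.toNat: exact, every i in range(n+1) is in bounds)
-- the Python list with index assignment is ported as Array (exact: every index j the
-- loop writes comes from range(0, n+1, m), so 0 ≤ j ≤ n and the write is in bounds)
def sum_natural_multiples_alt (n : Int) (mults : List Int) : Int :=
  if n < 0 then 0
  else
    let marked :=
      (PySem.Set.ofList (mults.map (fun x => |x|))).foldl
        (fun marked m =>
          (PySem.List.pyRange 0 (n + 1) m).foldl
            (fun a j => a.setIfInBounds j.toNat true) marked)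
        (Array.replicate (n + 1).toNat false)
    (PySem.List.pyRange 0 (n + 1) 1).foldl
      (fun acc i => if marked.getD i.toNat false then acc + i else acc) 0

-- ===== PRECONDITION & SPEC =====
-- Pre_ excludes lists containing 0: there A evaluates 'i % 0' and raises
-- ZeroDivisionError on almost all such inputs (it happens to return only when every
-- i ≤ n meets an earlier divisor in the list, e.g. n ≤ 0 or a 1 placed before the 0),
-- and B raises ValueError (zero range step) on such lists too.
def Pre_sum_natural_multiples (n : Int) (mults : List Int) : Prop := (0 : Int) ∉ mults
instance (n : Int) (mults : List Int) : Decidable (Pre_sum_natural_multiples n mults) := by unfold Pre_sum_natural_multiples; infer_instance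
def pvWitness_sum_natural_multiples : Int × List Int := (10, [3, 5])

def Spec_sum_natural_multiples (n : Int) (mults : List Int) (out : Int) : Prop := out = sum_natural_multiples_alt n mults
instance (n : Int) (mults : List Int) (out : Int) : Decidable (Spec_sum_natural_multiples n mults out) := by unfold Spec_sum_natural_multiples; infer_instance

-- ===== CLAIM (what is proved, stated in full; the proofs are below) =====
def Claim_equal_sum_natural_multiples : Prop := ∀ (n : Int) (mults : List Int), Dom_sum_natural_multiples n mults → Pre_sum_natural_multiples n mults → Spec_sum_natural_multiples n mults (sum_natural_multiples n mults)

-- ===== LEMMAS AND PROOFS =====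

-- proof-side divisibility predicate: some modulus in l divides i
def pvDivs (l : List Int) (i : Int) : Bool := l.any (fun m => m ∣ i)

-- the reference value: sum of 0..N-1 restricted by a Bool predicate
def pvRef (N : Nat) (p : Int → Bool) : Int :=
  ∑ i ∈ Finset.range N, (if p (i : Int) then (i : Int) else 0)

lemma pvMod_zero_iff (i m : Int) : (PySem.Int.mod i m == 0) = decide (m ∣ i) := by
  by_cases h : m ∣ i <;> simp [h, PySem.Int.mod_eq_zero_iff_dvd]

lemma pvSum_map_range (f : Nat → Int) (N : Nat) :
    ((List.range N).map f).sum = ∑ i ∈ Finset.range N, f i := by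
  induction N with
  | zero => simp
  | succ N ih => simp [List.range_succ, Finset.sum_range_succ, ih]

lemma pvFoldl_if_sum (p : Int → Bool) (xs : List Int) (c : Int) :
    xs.foldl (fun acc i => if p i then acc + i else acc) c
      = c + (xs.map (fun i => if p i then i else 0)).sum := by
  induction xs generalizing c with
  | nil => simp
  | cons x xs ih =>
    by_cases h : p x
    · simp [h, ih]; ring
    · simp [h, ih]

-- A's fold equals the reference sum
lemma pvA_eq_ref (n : Int) (mults : List Int) :
    sum_natural_multiples n mults = pvRef (n + 1).toNat (pvDivs mults) := by
  unfold sum_natural_multiples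
  have hfun : (fun (acc i : Int) => if mults.any (fun m => PySem.Int.mod i m == 0) then acc + i else acc)
      = (fun acc i => if pvDivs mults i then acc + i else acc) := by
    funext acc i
    simp only [pvDivs, pvMod_zero_iff]
    rfl
  rw [hfun, PySem.List.pyRange_one, pvFoldl_if_sum, List.map_map, pvSum_map_range]
  simp [pvRef]

-- marking a list of in-range positions: the table reads back as membership
lemma pvMark_getD (js : List Int) (a : Array Bool)
    (hjs : ∀ j ∈ js, 0 ≤ j ∧ j < (a.size : Int)) (i : Nat) :
    ((js.foldl (fun acc j => acc.setIfInBounds j.toNat true) a)[i]?.getD false)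
      = (a[i]?.getD false || decide ((i : Int) ∈ js)) := by
  induction js generalizing a with
  | nil => simp
  | cons j js ih =>
    obtain ⟨hj0, hjl⟩ := hjs j List.mem_cons_self
    have hlen : (a.setIfInBounds j.toNat true).size = a.size := Array.size_setIfInBounds
    simp only [List.foldl_cons]
    rw [ih (a.setIfInBounds j.toNat true)
      (fun x hx => by rw [hlen]; exact hjs x (List.mem_cons_of_mem j hx))]
    have hget : ((a.setIfInBounds j.toNat true)[i]?.getD false)
        = if i = j.toNat then true else a[i]?.getD false := by
      rw [Array.getElem?_setIfInBounds]
      by_cases hij : j.toNat = i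
      · have hlt : j.toNat < a.size := by omega
        rw [if_pos hij, if_pos hlt, if_pos hij.symm]
        rfl
      · rw [if_neg hij, if_neg (fun h : i = j.toNat => hij h.symm)]
    rw [hget]
    by_cases hij : i = j.toNat
    · simp [hij, List.mem_cons]
      exact Or.inr (Or.inl hj0)
    · have hne : (i : Int) ≠ j := by omega
      simp [hij, List.mem_cons, hne]

lemma pvMark_size (js : List Int) (a : Array Bool) :
    (js.foldl (fun acc j => acc.setIfInBounds j.toNat true) a).size = a.size := by
  induction js generalizing a with
  | nil => rfl
  | cons j js ih => simp only [List.foldl_cons]; rw [ih, Array.size_setIfInBounds]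

-- one sieve row: position i gets marked iff m divides i
lemma pvRow_getD (n : Int) (m : Int) (hm : 1 ≤ m) (a : Array Bool)
    (hlen : (a.size : Int) = n + 1) (i : Nat) (hi : i < a.size) :
    (((PySem.List.pyRange 0 (n + 1) m).foldl (fun acc j => acc.setIfInBounds j.toNat true) a)[i]?.getD false)
      = (a[i]?.getD false || decide (m ∣ (i : Int))) := by
  rw [pvMark_getD _ a (fun j hj => by
      rw [PySem.List.mem_pyRange_iff_of_pos (by omega) j] at hj
      omega) i]
  congr 1
  rw [Bool.eq_iff_iff, decide_eq_true_iff, decide_eq_true_iff,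
    PySem.List.mem_pyRange_iff_of_pos (by omega : (0:Int) < m) (i : Int)]
  constructor
  · rintro ⟨-, -, hd⟩
    simpa using hd
  · intro hd
    exact ⟨by omega, by omega, by simpa using hd⟩

-- the whole sieve: position i gets marked iff some listed modulus divides i
lemma pvOuter_getD (ms : List Int) (hms : ∀ m ∈ ms, 1 ≤ m) (n : Int)
    (a : Array Bool) (hlen : (a.size : Int) = n + 1) (i : Nat) (hi : i < a.size) :
    ((ms.foldl (fun acc m => (PySem.List.pyRange 0 (n + 1) m).foldl
        (fun b j => b.setIfInBounds j.toNat true) acc) a)[i]?.getD false)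
      = (a[i]?.getD false || decide (∃ m ∈ ms, m ∣ (i : Int))) := by
  induction ms generalizing a with
  | nil => simp
  | cons m ms ih =>
    have hm : 1 ≤ m := hms m List.mem_cons_self
    have hms' : ∀ x ∈ ms, 1 ≤ x := fun x hx => hms x (List.mem_cons_of_mem m hx)
    simp only [List.foldl_cons]
    have hlen' : (((PySem.List.pyRange 0 (n + 1) m).foldl
        (fun b j => b.setIfInBounds j.toNat true) a).size : Int) = n + 1 := by
      rw [pvMark_size]; exact hlen
    rw [ih hms' _ hlen' (by rw [pvMark_size]; exact hi)]
    rw [pvRow_getD n m hm a hlen i hi]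
    by_cases h1 : m ∣ (i : Int) <;> by_cases h2 : ∃ x ∈ ms, x ∣ (i : Int) <;>
      simp [h1, h2, List.mem_cons]

lemma pvOuter_size (ms : List Int) (n : Int) (a : Array Bool) :
    (ms.foldl (fun acc m => (PySem.List.pyRange 0 (n + 1) m).foldl
        (fun b j => b.setIfInBounds j.toNat true) acc) a).size = a.size := by
  induction ms generalizing a with
  | nil => rfl
  | cons m ms ih => simp only [List.foldl_cons]; rw [ih, pvMark_size]

-- the distinct-|m| list decides the same divisibility predicate as mults
lemma pvDivs_setlist (mults : List Int) (i : Int) :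
    decide (∃ m ∈ (PySem.Set.ofList (mults.map (fun x => |x|)) : List Int), m ∣ i) = pvDivs mults i := by
  rw [Bool.eq_iff_iff, decide_eq_true_iff]
  simp only [pvDivs, List.any_eq_true, decide_eq_true_eq]
  constructor
  · rintro ⟨m, hm, hd⟩
    rw [PySem.Set.mem_ofList] at hm
    obtain ⟨y, hy, rfl⟩ := List.mem_map.1 hm
    exact ⟨y, hy, (abs_dvd y i).1 hd⟩
  · rintro ⟨m, hm, hd⟩
    refine ⟨|m|, ?_, (abs_dvd m i).2 hd⟩
    rw [PySem.Set.mem_ofList]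
    exact List.mem_map.2 ⟨m, hm, rfl⟩

lemma pvSetlist_pos (mults : List Int) (h0 : (0 : Int) ∉ mults) :
    ∀ m ∈ PySem.Set.ofList (mults.map (fun x => |x|)), 1 ≤ m := by
  intro m hm
  rw [PySem.Set.mem_ofList] at hm
  obtain ⟨y, hy, rfl⟩ := List.mem_map.1 hm
  have : y ≠ 0 := fun h' => h0 (h' ▸ hy)
  exact Int.one_le_abs (by omega)

-- B's sieve equals the reference sum
lemma pvAlt_eq_ref (n : Int) (mults : List Int) (h0 : (0 : Int) ∉ mults) :
    pvRef (n + 1).toNat (pvDivs mults) = sum_natural_multiples_alt n mults := by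
  unfold sum_natural_multiples_alt
  by_cases hn : n < 0
  · rw [if_pos hn]
    have h1 : (n + 1).toNat = 0 := by omega
    rw [h1]
    simp [pvRef]
  · rw [if_neg hn]
    dsimp only
    set ms := PySem.Set.ofList (mults.map (fun x => |x|)) with hms
    set marked := ms.foldl (fun acc m => (PySem.List.pyRange 0 (n + 1) m).foldl
        (fun b j => b.setIfInBounds j.toNat true) acc) (Array.replicate (n + 1).toNat false) with hmarked
    have hlen0 : ((Array.replicate (n + 1).toNat false).size : Int) = n + 1 := by
      rw [Array.size_replicate]; omega
    have hsize : marked.size = (n + 1).toNat := by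
      rw [hmarked, pvOuter_size, Array.size_replicate]
    rw [pvFoldl_if_sum (fun i => marked.getD i.toNat false), PySem.List.pyRange_one,
      List.map_map, pvSum_map_range]
    simp only [sub_zero, zero_add]
    unfold pvRef
    refine Finset.sum_congr rfl (fun i hi => ?_)
    have h2 : i < (n + 1).toNat := by
      have := Finset.mem_range.1 hi
      omega
    have hget := pvOuter_getD ms (pvSetlist_pos mults h0) n
      (Array.replicate (n + 1).toNat false) hlen0 i (by rw [Array.size_replicate]; exact h2)
    rw [← hmarked] at hget
    have hval : marked.getD ((i : Int)).toNat false = pvDivs mults (i : Int) := by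
      have hti : ((i : Int)).toNat = i := by omega
      rw [hti, Array.getD_eq_getD_getElem?, hget, Array.getElem?_replicate, if_pos h2]
      simp only [Option.getD_some, Bool.false_or]
      exact pvDivs_setlist mults (i : Int)
    simp only [Function.comp_apply, hval]

-- ===== VERDICT (by name: the statement is the Claim_ definition above) =====
theorem sum_natural_multiples_spec : Claim_equal_sum_natural_multiples := by
  intro n mults _ hpre
  unfold Spec_sum_natural_multiples
  rw [pvA_eq_ref, pvAlt_eq_ref n mults hpre]
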